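-- pv_equiv track=rewrite | github.com/costas-basdekis/advent-of-code-submissions | year_2015/day_19/part_a.py | get_next_steps_for_replacement
-- ===== SOURCE A (Python) =====
-- from typing import Dict, List, Tuple, Iterable, Set
--
-- def get_next_steps_for_replacement(start: str, match: str,
--                                    result: str) -> Iterable[str]:
--     """
--     >>> list(Machine().get_next_steps_for_replacement('HOH', 'H', 'HO'))
--     ['HOOH', 'HOHO']
--     """
--     prefix = ""
--     remaining = start
--     while len(remaining) >= len(match):
--         parts = remaining.split(match, 1)
--         if len(parts) < 2:
--             return
--         extra_prefix, suffix = parts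
--         yield f"{prefix}{extra_prefix}{result}{suffix}"
--         prefix = f"{prefix}{extra_prefix}{match[:1]}"
--         remaining = start[len(prefix):]
-- ===== SOURCE B (Python) =====
-- def get_next_steps_for_replacement(start: str, match: str, result: str):
--     indices = []
--     pos = start.find(match)
--     while pos != -1:
--         indices.append(pos)
--         pos = start.find(match, pos + 1)
--     return [start[:i] + result + start[i + len(match):] for i in indices]
-- ===== Notes on version B (the rewrite author's own statement) =====
-- stated objective: simpler
-- what changed: A repeatedly re-splits a shrinking suffix while rebuilding a growing prefix string; B does one find-driven scan that collects all (overlapping) occurrence indices and then emits each replacement by slicing start once per index.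
import Mathlib
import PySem

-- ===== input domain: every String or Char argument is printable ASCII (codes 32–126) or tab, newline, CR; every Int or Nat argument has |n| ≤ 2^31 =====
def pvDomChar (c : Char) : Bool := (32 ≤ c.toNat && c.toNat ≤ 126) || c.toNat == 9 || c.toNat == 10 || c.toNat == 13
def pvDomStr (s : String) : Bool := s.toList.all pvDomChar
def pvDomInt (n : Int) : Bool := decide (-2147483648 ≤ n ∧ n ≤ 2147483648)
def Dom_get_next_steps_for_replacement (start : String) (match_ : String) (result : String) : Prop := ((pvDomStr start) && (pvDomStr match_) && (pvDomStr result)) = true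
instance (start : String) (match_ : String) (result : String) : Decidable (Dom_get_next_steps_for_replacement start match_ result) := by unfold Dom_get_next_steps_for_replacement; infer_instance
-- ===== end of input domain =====

-- B replaces A's grow-a-prefix-and-re-split loop by one find-driven scan collecting the
-- occurrence indices, then a single splicing pass over those indices (objective: simpler).

-- ===== PORT A =====
-- prefix = ""; remaining = start
-- while len(remaining) >= len(match): parts = remaining.split(match, 1); …
def pvALoop (start match_ result : List Char) : Nat → List Char → List Char → List String
  | 0, _, _ => []
  | fuel+1, pfx, remaining =>
    if match_.length ≤ remaining.length then
      match PySem.Chars.splitMax? remaining match_ 1 with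
      | none => []            -- Python raises ValueError('empty separator'); excluded by Pre_
      | some parts =>
        match parts with
        | [extra_pfx, suffix] =>
          -- yield f"{prefix}{extra_prefix}{result}{suffix}"; prefix = prefix + extra_prefix + match[:1]
          let pfx' := pfx ++ extra_pfx ++ PySem.Chars.slice match_ none (some 1)
          String.ofList (pfx ++ extra_pfx ++ result ++ suffix) ::
            pvALoop start match_ result fuel pfx'
              (PySem.Chars.slice start (some (pfx'.length : Int)) none)   -- remaining = start[len(prefix):]
        | _ => []             -- if len(parts) < 2: return
    else []
-- fuel start.length+1 suffices: len(prefix) grows by at least 1 per iteration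

def get_next_steps_for_replacement (start : String) (match_ : String) (result : String) : List String :=
  pvALoop start.toList match_.toList result.toList (start.toList.length + 1) [] start.toList

-- ===== PORT B =====
-- collect every occurrence with pos = start.find(match, pos + 1), then splice in a second pass
def pvBCollect (start match_ : List Char) : Nat → Int → List Int
  | 0, _ => []
  | fuel+1, pos =>
    if pos ≠ -1 then
      pos :: pvBCollect start match_ fuel (PySem.Chars.findFrom start match_ (pos + 1) none)
    else []
-- fuel start.length+1 suffices: pos strictly increases, at most len+1 loop iterations

def get_next_steps_for_replacement_alt (start : String) (match_ : String) (result : String) : List String :=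
  (pvBCollect start.toList match_.toList (start.toList.length + 1)
      (PySem.Chars.find start.toList match_.toList)).map
    (fun i => String.ofList (PySem.Chars.slice start.toList none (some i) ++ result.toList ++
      PySem.Chars.slice start.toList (some (i + (match_.toList.length : Int))) none))

-- ===== PRECONDITION & SPEC =====
-- Pre_ excludes only match_ = "", where A raises ValueError('empty separator') from str.split.
def Pre_get_next_steps_for_replacement (start : String) (match_ : String) (result : String) : Prop := match_ ≠ ""
instance (start : String) (match_ : String) (result : String) : Decidable (Pre_get_next_steps_for_replacement start match_ result) := by unfold Pre_get_next_steps_for_replacement; infer_instance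

def pvWitness_get_next_steps_for_replacement : String × String × String := ("HOH", "H", "HO")

def Spec_get_next_steps_for_replacement (start : String) (match_ : String) (result : String) (out : List String) : Prop := out = get_next_steps_for_replacement_alt start match_ result
instance (start : String) (match_ : String) (result : String) (out : List String) : Decidable (Spec_get_next_steps_for_replacement start match_ result out) := by unfold Spec_get_next_steps_for_replacement; infer_instance

-- ===== CLAIM (what is proved, stated in full; the proofs are below) =====
def Claim_equal_get_next_steps_for_replacement : Prop := ∀ (start : String) (match_ : String) (result : String), Dom_get_next_steps_for_replacement start match_ result → Pre_get_next_steps_for_replacement start match_ result → Spec_get_next_steps_for_replacement start match_ result (get_next_steps_for_replacement start match_ result)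

-- ===== LEMMAS AND PROOFS =====

-- the (overlapping, +1-step) occurrence indices of m in s at positions ≥ k
def pvOcc (s m : List Char) : Nat → Nat → List Nat
  | 0, _ => []
  | fuel+1, k =>
    let f := PySem.Chars.find (s.drop k) m
    if f = -1 then [] else (k + f.toNat) :: pvOcc s m fuel (k + f.toNat + 1)

lemma pvFindGo_shift (sep : List Char) : ∀ (l : List Char) (k : Nat),
    PySem.Chars.find.go sep l k =
      if PySem.Chars.find.go sep l 0 = -1 then -1 else PySem.Chars.find.go sep l 0 + k := by
  intro l
  induction l with
  | nil =>
    intro k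
    simp only [PySem.Chars.find.go]
    split_ifs <;> simp_all
  | cons c rest ih =>
    intro k
    rw [PySem.Chars.find.go, PySem.Chars.find.go]
    by_cases hp : sep.isPrefixOf (c :: rest) = true
    · simp [hp]
    · simp only [eq_false_of_ne_true hp, if_false, Bool.false_eq_true]
      rw [ih (k+1), ih 1]
      have h1 : -1 ≤ PySem.Chars.find.go sep rest 0 := PySem.Chars.neg_one_le_find rest sep
      push_cast
      split_ifs <;> omega

lemma pvFind_cons (sep : List Char) (c : Char) (rest : List Char)
    (h : sep.isPrefixOf (c :: rest) = false) :
    PySem.Chars.find (c :: rest) sep =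
      if PySem.Chars.find rest sep = -1 then -1 else PySem.Chars.find rest sep + 1 := by
  show PySem.Chars.find.go sep (c :: rest) 0 = _
  rw [PySem.Chars.find.go]
  simp only [h, Bool.false_eq_true, if_false]
  exact pvFindGo_shift sep rest 1

lemma pvFind_nil (sep : List Char) (hsep : sep ≠ []) : PySem.Chars.find ([] : List Char) sep = -1 := by
  show PySem.Chars.find.go sep [] 0 = -1
  rw [PySem.Chars.find.go]
  simp [List.isEmpty_iff, hsep]

lemma pvFind_prefix (sep : List Char) (c : Char) (rest : List Char)
    (h : sep.isPrefixOf (c :: rest) = true) : PySem.Chars.find (c :: rest) sep = 0 := by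
  show PySem.Chars.find.go sep (c :: rest) 0 = 0
  rw [PySem.Chars.find.go]
  simp [h]

lemma pvSplitGo_zero (sep : List Char) : ∀ (fuel : Nat) (l cur : List Char) (acc : List (List Char)),
    PySem.Chars.splitOnMax.go sep fuel 0 l cur acc = ((cur.reverse ++ l) :: acc).reverse := by
  intro fuel l cur acc
  match fuel, l with
  | 0, l => rw [PySem.Chars.splitOnMax.go]
  | f+1, [] => rw [PySem.Chars.splitOnMax.go] <;> simp
  | f+1, c :: rest => rw [PySem.Chars.splitOnMax.go]; simp

lemma pvSplitGo_one (sep : List Char) (hsep : sep ≠ []) : ∀ (l : List Char) (fuel : Nat)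
    (cur : List Char) (acc : List (List Char)), l.length < fuel →
    PySem.Chars.splitOnMax.go sep fuel 1 l cur acc =
      if PySem.Chars.find l sep = -1 then ((cur.reverse ++ l) :: acc).reverse
      else acc.reverse ++ [cur.reverse ++ l.take (PySem.Chars.find l sep).toNat,
        l.drop ((PySem.Chars.find l sep).toNat + sep.length)] := by
  intro l
  induction l with
  | nil =>
    intro fuel cur acc hf
    obtain ⟨f, rfl⟩ : ∃ f, fuel = f + 1 := ⟨fuel - 1, by omega⟩
    rw [PySem.Chars.splitOnMax.go] <;> simp [pvFind_nil sep hsep]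
  | cons c rest ih =>
    intro fuel cur acc hf
    obtain ⟨f, rfl⟩ : ∃ f, fuel = f + 1 := ⟨fuel - 1, by omega⟩
    rw [PySem.Chars.splitOnMax.go]
    by_cases hp : sep.isPrefixOf (c :: rest) = true
    · simp only [hp, if_true, one_ne_zero, if_false]
      rw [pvSplitGo_zero]
      simp [pvFind_prefix sep c rest hp]
    · simp only [eq_false_of_ne_true hp, Bool.false_eq_true, if_false, one_ne_zero]
      rw [ih f (c :: cur) acc (by simpa using Nat.lt_of_succ_lt_succ hf)]
      rw [pvFind_cons sep c rest (eq_false_of_ne_true hp)]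
      have h1 : -1 ≤ PySem.Chars.find rest sep := PySem.Chars.neg_one_le_find rest sep
      by_cases hr : PySem.Chars.find rest sep = -1
      · simp [hr]
      · have h0 : 0 ≤ PySem.Chars.find rest sep := by omega
        have hne : PySem.Chars.find rest sep + 1 ≠ -1 := by omega
        simp only [hr, hne, if_false]
        have ht : (PySem.Chars.find rest sep + 1).toNat = (PySem.Chars.find rest sep).toNat + 1 := by omega
        rw [ht]
        simp [Nat.add_right_comm]

lemma pvSplitMax_one (s sep : List Char) (hsep : sep ≠ []) :
    PySem.Chars.splitMax? s sep 1 = some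
      (if PySem.Chars.find s sep = -1 then [s]
       else [s.take (PySem.Chars.find s sep).toNat,
         s.drop ((PySem.Chars.find s sep).toNat + sep.length)]) := by
  rw [PySem.Chars.splitMax?]
  simp only [List.isEmpty_iff, hsep, if_false]
  rw [PySem.Chars.splitOnMax]
  norm_num
  rw [pvSplitGo_one sep hsep s (s.length + 1) [] [] (by omega)]
  split_ifs <;> simp

lemma pvOcc_lt {s m : List Char} {k : Nat} (hm : m ≠ [])
    (h : PySem.Chars.find (s.drop k) m ≠ -1) :
    k + (PySem.Chars.find (s.drop k) m).toNat < s.length := by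
  have h0 : 0 ≤ PySem.Chars.find (s.drop k) m := by
    have := PySem.Chars.neg_one_le_find (s.drop k) m
    omega
  have hs := (PySem.Chars.find_spec h0).1
  have hlen := hs.length_le
  have hmpos : 0 < m.length := List.length_pos_of_ne_nil hm
  simp [List.length_drop] at hlen
  omega

lemma pvA_eq (s m r : List Char) (hm : m ≠ []) : ∀ (fuel k : Nat), k ≤ s.length →
    pvALoop s m r fuel (s.take k) (s.drop k) =
      (pvOcc s m fuel k).map (fun j => String.ofList (s.take j ++ r ++ s.drop (j + m.length))) := by
  intro fuel
  induction fuel with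
  | zero => intro k hk; simp [pvALoop, pvOcc]
  | succ f ih =>
    intro k hk
    by_cases hc : PySem.Chars.find (s.drop k) m = -1
    · rw [pvALoop]
      simp only [pvOcc, hc, if_true, List.map_nil]
      by_cases hg : m.length ≤ (s.drop k).length
      · rw [if_pos hg, pvSplitMax_one (s.drop k) m hm, if_pos hc]
      · rw [if_neg hg]
    · have h0 : 0 ≤ PySem.Chars.find (s.drop k) m := by
        have := PySem.Chars.neg_one_le_find (s.drop k) m
        omega
      set t := (PySem.Chars.find (s.drop k) m).toNat with ht
      have hjlt : k + t < s.length := pvOcc_lt hm hc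
      have hpre : m <+: (s.drop k).drop t := (PySem.Chars.find_spec h0).1
      have hg : m.length ≤ (s.drop k).length := by
        have := hpre.length_le
        simp only [List.length_drop] at this ⊢
        omega
      have hdrop : (s.drop k).drop t = s.drop (k + t) := by
        rw [List.drop_drop]
      obtain ⟨c, m0, rfl⟩ : ∃ c m0, m = c :: m0 := by
        cases m with
        | nil => exact absurd rfl hm
        | cons a b => exact ⟨a, b, rfl⟩
      rw [pvALoop, if_pos hg, pvSplitMax_one (s.drop k) (c :: m0) hm, if_neg hc]
      show String.ofList (s.take k ++ (s.drop k).take t ++ r ++ (s.drop k).drop (t + (c :: m0).length)) ::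
          pvALoop s (c :: m0) r f (s.take k ++ (s.drop k).take t ++ PySem.Chars.slice (c :: m0) none (some 1))
            (PySem.Chars.slice s (some ((s.take k ++ (s.drop k).take t ++ PySem.Chars.slice (c :: m0) none (some 1)).length : Int)) none) = _
      have hsl1 : PySem.Chars.slice (c :: m0) none (some 1) = [c] := by
        rw [PySem.Chars.slice_eq_listSlice, PySem.List.slice_to (c :: m0) (by norm_num : (0:Int) ≤ 1)]
        simp
      have hTP : s.take k ++ (s.drop k).take t = s.take (k + t) := (List.take_add).symm
      rw [hsl1, hTP]
      obtain ⟨rest0, hrest0⟩ := hpre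
      have hgetj : s[k + t]? = some c := by
        have hd : s.drop (k + t) = c :: (m0 ++ rest0) := by
          rw [← hdrop, ← hrest0]
          simp
        have h00 : s[k + t]? = (s.drop (k + t))[0]? := by
          simp [List.getElem?_drop]
        rw [h00, hd]
        rfl
      have hpfx : s.take (k + t) ++ [c] = s.take (k + t + 1) := by
        rw [List.take_add_one, hgetj]
        rfl
      rw [hpfx]
      have hlen : ((s.take (k + t + 1)).length : Int) = ((k + t + 1 : Nat) : Int) := by
        have hlen' : (s.take (k + t + 1)).length = k + t + 1 :=
          List.length_take_of_le (by omega)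
        rw [hlen']
      rw [hlen, PySem.Chars.slice_eq_listSlice, PySem.List.slice_from_natCast]
      rw [ih (k + t + 1) (by omega)]
      have hocc : pvOcc s (c :: m0) (f + 1) k = (k + t) :: pvOcc s (c :: m0) f (k + t + 1) := by
        rw [pvOcc]
        simp only [← ht, hc, if_false]
      have hdd : List.drop (t + (c :: m0).length) (List.drop k s) = List.drop (k + t + (c :: m0).length) s := by
        rw [List.drop_drop]
        congr 1
        omega
      rw [hocc, List.map_cons, hdd]

lemma pvB_eq (s m : List Char) (hm : m ≠ []) : ∀ (fuel k : Nat), k ≤ s.length →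
    pvBCollect s m fuel (PySem.Chars.findFrom s m (k : Int) none) =
      List.map (fun j : Nat => (j : Int)) (pvOcc s m fuel k) := by
  intro fuel
  induction fuel with
  | zero => intro k hk; simp [pvBCollect, pvOcc]
  | succ f ih =>
    intro k hk
    rw [PySem.Chars.findFrom_natCast s m k hk]
    by_cases hc : PySem.Chars.find (s.drop k) m = -1
    · simp [pvBCollect, pvOcc, hc]
    · have h0 : 0 ≤ PySem.Chars.find (s.drop k) m := by
        have := PySem.Chars.neg_one_le_find (s.drop k) m
        omega
      have hlt := pvOcc_lt hm hc
      have hne : (k : Int) + PySem.Chars.find (s.drop k) m ≠ -1 := by omega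
      simp only [pvBCollect, pvOcc, hc, hne, if_false, ne_eq, not_false_iff, if_true]
      have harg : (k : Int) + PySem.Chars.find (s.drop k) m + 1 =
          ((k + (PySem.Chars.find (s.drop k) m).toNat + 1 : Nat) : Int) := by
        push_cast
        omega
      rw [harg, ih (k + (PySem.Chars.find (s.drop k) m).toNat + 1) (by omega)]
      simp
      omega

-- ===== VERDICT (by name: the statement is the Claim_ definition above) =====
theorem get_next_steps_for_replacement_spec : Claim_equal_get_next_steps_for_replacement := by
  intro start match_ result _ hpre
  unfold Spec_get_next_steps_for_replacement
  have hm : match_.toList ≠ [] := by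
    intro h
    exact hpre (by simpa using congrArg String.ofList h)
  unfold get_next_steps_for_replacement get_next_steps_for_replacement_alt
  have hA := pvA_eq start.toList match_.toList result.toList hm (start.toList.length + 1) 0 (by omega)
  simp only [List.take_zero, List.drop_zero] at hA
  have hB := pvB_eq start.toList match_.toList hm (start.toList.length + 1) 0 (by omega)
  rw [show ((0:Nat):Int) = (0:Int) from rfl, PySem.Chars.findFrom_zero] at hB
  rw [hA, hB, List.map_map]
  refine List.map_congr_left fun j _ => ?_
  simp only [Function.comp]
  rw [PySem.Chars.slice_eq_listSlice, PySem.Chars.slice_eq_listSlice,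
    PySem.List.slice_to_natCast, show ((j:Int) + (match_.toList.length : Int)) = ((j + match_.toList.length : Nat) : Int) by push_cast; ring,
    PySem.List.slice_from_natCast]
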